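-- pv_equiv track=rewrite | github.com/pitamakan/acyclic_graph_visualization | main.py | less
-- ===== SOURCE A (Python) =====
-- def less(first, second):
--     for u, v in zip(sorted(first, reverse=True), sorted(second, reverse=True)):
--         if u < v:
--             return True
--         if v < u:
--             return False
--     if len(first) < len(second):
--         return True
--     return False
-- ===== SOURCE B (Python) =====
-- def less(first, second):
--     # Selection-based comparison: repeatedly compare and remove the maxima,
--     # without sorting either list.
--     a = list(first)
--     b = list(second)
--     while a and b:
--         u = max(a)
--         v = max(b)
--         if u != v:
--             return u < v
--         a.remove(u)
--         b.remove(v)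
--     return bool(b)
-- ===== Notes on version B (the rewrite author's own statement) =====
-- stated objective: faster
-- what changed: B never sorts: it repeatedly extracts and compares the maxima of the two lists, deciding at the first unequal pair of maxima (one O(n) scan on typical inputs, O(n*d) where d is the depth of the first difference, O(n^2) worst case) instead of A's sort-both-descending-then-zip scan.
import Mathlib
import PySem

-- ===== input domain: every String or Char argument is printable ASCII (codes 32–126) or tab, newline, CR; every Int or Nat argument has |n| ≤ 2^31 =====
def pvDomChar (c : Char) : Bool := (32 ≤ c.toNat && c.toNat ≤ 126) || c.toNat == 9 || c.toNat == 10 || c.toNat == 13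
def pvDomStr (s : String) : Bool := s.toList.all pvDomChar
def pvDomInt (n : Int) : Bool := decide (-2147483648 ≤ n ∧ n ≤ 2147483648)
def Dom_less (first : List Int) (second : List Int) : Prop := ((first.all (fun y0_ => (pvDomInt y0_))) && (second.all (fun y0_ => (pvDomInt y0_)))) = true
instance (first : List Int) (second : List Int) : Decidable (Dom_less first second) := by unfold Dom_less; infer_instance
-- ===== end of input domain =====

-- B replaces A's sort-both-then-zip scan by repeated extraction of the two maxima; equal return value on all inputs.

-- ===== PORT A =====
-- the for-loop over zip(...); the fallback Bool is len(first) < len(second)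
def lessLoop (pairs : List (Int × Int)) (fallback : Bool) : Bool :=
  match pairs with
  | [] => fallback
  | (u, v) :: rest =>
      if u < v then true
      else if v < u then false
      else lessLoop rest fallback

def less (first : List Int) (second : List Int) : Bool :=
  lessLoop ((PySem.List.sorted first (fun x => x) true).zip
            (PySem.List.sorted second (fun x => x) true))
           (decide (first.length < second.length))

-- ===== PORT B =====
-- the while loop of Source B: a, b are the shrinking copies; max(a) = PySem.List.max?,
-- a.remove(u) = List.erase (exact here since u ∈ a, so the first matching occurrence exists)
def lessGo (a : List Int) (b : List Int) : Bool :=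
  match a, b with
  | [], b => !b.isEmpty          -- loop over: return bool(b)
  | _ :: _, [] => false          -- loop over, b empty: bool(b) = False
  | x :: xs, y :: ys =>
      let u := (PySem.List.max? (x :: xs) (fun z => z)).getD 0
      let v := (PySem.List.max? (y :: ys) (fun z => z)).getD 0
      if u ≠ v then decide (u < v)
      else lessGo ((x :: xs).erase u) ((y :: ys).erase v)
termination_by a.length
decreasing_by
  have hs : PySem.List.max? (x :: xs) (fun z => z) = some (xs.foldl max x) :=
    PySem.List.max?_id_cons x xs
  have hm : xs.foldl max x ∈ x :: xs := PySem.List.max?_mem hs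
  simp [hs, hm]

def less_alt (first : List Int) (second : List Int) : Bool :=
  lessGo first second

-- ===== PRECONDITION & SPEC =====
def Spec_less (first : List Int) (second : List Int) (out : Bool) : Prop := out = less_alt first second
instance (first : List Int) (second : List Int) (out : Bool) : Decidable (Spec_less first second out) := by unfold Spec_less; infer_instance

-- ===== CLAIM (what is proved, stated in full; the proofs are below) =====
def Claim_equal_less : Prop := ∀ (first : List Int) (second : List Int), Dom_less first second → Spec_less first second (less first second)

-- ===== LEMMAS AND PROOFS =====

-- the descending sort of a nonempty list is its max followed by the descending sort of the rest
-- the descending sort of a nonempty list is its max followed by the descending sort of the rest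
lemma sortedRev_cons_max (a : List Int) (m : Int)
    (hm : PySem.List.max? a (fun z => z) = some m) :
    PySem.List.sorted a (fun x => x) true
      = m :: PySem.List.sorted (a.erase m) (fun x => x) true := by
  have hmem : m ∈ a := PySem.List.max?_mem hm
  have hperm : (PySem.List.sorted a (fun x => x) true).Perm
      (m :: PySem.List.sorted (a.erase m) (fun x => x) true) := by
    refine (PySem.List.sorted_perm a _ true).trans ?_
    exact (List.perm_cons_erase hmem).trans
      (((PySem.List.sorted_perm (a.erase m) _ true).symm).cons m)
  have hpw1 : (PySem.List.sorted a (fun x => x) true).Pairwise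
      (fun p q : Int => -p ≤ -q) := by
    have h := PySem.List.sorted_pairwise_rev a (fun x => x)
    simpa using h
  have hpw2 : (m :: PySem.List.sorted (a.erase m) (fun x => x) true).Pairwise
      (fun p q : Int => -p ≤ -q) := by
    refine List.pairwise_cons.mpr ⟨?_, ?_⟩
    · intro y hy
      have hy' : y ∈ a.erase m := (PySem.List.mem_sorted _ _ _ y).mp hy
      have : y ∈ a := List.mem_of_mem_erase hy'
      simpa using PySem.List.max?_isMax hm y this
    · have h := PySem.List.sorted_pairwise_rev (a.erase m) (fun x => x)
      simpa using h
  exact PySem.List.eq_of_perm_of_pairwise_le_of_injective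
    (fun z : Int => -z) neg_injective hperm hpw1 hpw2

-- the empty-side cases of the loop agree with the fallback
lemma key_nil_left (b : List Int) :
    lessLoop (([] : List Int).zip (PySem.List.sorted b (fun x => x) true))
             (decide ((0:Nat) < b.length)) = !b.isEmpty := by
  cases b <;> simp [lessLoop]

-- main loop correspondence, by induction on a bound for a.length
lemma key : ∀ (n : Nat) (a b : List Int), a.length ≤ n →
    lessLoop ((PySem.List.sorted a (fun x => x) true).zip
              (PySem.List.sorted b (fun x => x) true))
             (decide (a.length < b.length)) = lessGo a b := by
  intro n
  induction n with
  | zero =>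
    intro a b h
    have ha : a = [] := List.length_eq_zero_iff.mp (Nat.le_zero.mp h)
    subst ha
    simpa [PySem.List.sorted, lessGo] using key_nil_left b
  | succ n ih =>
    intro a b h
    match a, b with
    | [], b =>
      simpa [PySem.List.sorted, lessGo] using key_nil_left b
    | x :: xs, [] =>
      simp [PySem.List.sorted, lessGo, lessLoop]
    | x :: xs, y :: ys =>
      have hs1 : PySem.List.max? (x :: xs) (fun z => z) = some (xs.foldl max x) :=
        PySem.List.max?_id_cons x xs
      have hs2 : PySem.List.max? (y :: ys) (fun z => z) = some (ys.foldl max y) :=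
        PySem.List.max?_id_cons y ys
      have hm1 : xs.foldl max x ∈ x :: xs := PySem.List.max?_mem hs1
      have hm2 : ys.foldl max y ∈ y :: ys := PySem.List.max?_mem hs2
      rw [sortedRev_cons_max _ _ hs1, sortedRev_cons_max _ _ hs2]
      rw [List.zip_cons_cons, lessGo]
      simp only [hs1, hs2, Option.getD_some]
      set u := xs.foldl max x with hu
      set v := ys.foldl max y with hv
      by_cases hlt : u < v
      · simp [lessLoop, hlt, ne_of_lt hlt]
      · by_cases hgt : v < u
        · simp [lessLoop, hlt, hgt, (ne_of_lt hgt).symm]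
        · have heq : u = v := le_antisymm (not_lt.mp hgt) (not_lt.mp hlt)
          have hlen1 : ((x :: xs).erase u).length = xs.length := by
            rw [List.length_erase_of_mem hm1]; rfl
          have hlen2 : ((y :: ys).erase v).length = ys.length := by
            rw [List.length_erase_of_mem hm2]; rfl
          have hfb : decide ((x :: xs).length < (y :: ys).length)
              = decide (((x :: xs).erase u).length < ((y :: ys).erase v).length) := by
            rw [hlen1, hlen2]; simp
          have hle : ((x :: xs).erase u).length ≤ n := by
            rw [hlen1]
            exact Nat.lt_succ_iff.mp (lt_of_lt_of_le (Nat.lt_succ_self _) h)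
          rw [heq] at hfb hle ⊢
          simp only [lessLoop, lt_irrefl, if_false, ne_eq, not_true_eq_false]
          rw [hfb]
          exact ih _ _ hle

-- ===== VERDICT (by name: the statement is the Claim_ definition above) =====
theorem less_spec : Claim_equal_less := by
  intro first second _
  unfold Spec_less less less_alt
  exact key first.length first second le_rfl
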